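-- pv_equiv track=rewrite | github.com/realxwx/leetcode-python-solve | src/1933.py | isDecomposable
-- ===== SOURCE A (Python) =====
-- def isDecomposable(s: str) -> bool:
--     arr = []
--     t = ""
--     t += s[0]
--     for i in range(1, len(s)):
--         if s[i] == s[i - 1]:
--             t += s[i]
--         if s[i] != s[i - 1]:
--             arr.append(t)
--             t = s[i]
--     arr.append(t)
--     cnt = 0
--     for k in arr:
--         if len(k) == 1:
--             return False
--         if len(k) == 2:
--             cnt += 1
--             if cnt > 1:
--                 return False
--         if len(k) >= 3:
--             if len(k) % 3 == 0:
--                 pass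
--             if len(k) % 3 == 1:
--                 return False
--             if len(k) % 3 == 2:
--                 cnt += 1
--                 if cnt > 1:
--                     return False
--     return cnt == 1
-- ===== SOURCE B (Python) =====
-- def isDecomposable(s: str) -> bool:
--     # single pass with run-length counter instead of building the run list first
--     prev = s[0]
--     run = 1
--     cnt = 0
--     for c in s[1:]:
--         if c == prev:
--             run += 1
--         else:
--             r = run % 3
--             if r == 1:
--                 return False
--             if r == 2:
--                 cnt += 1
--                 if cnt > 1:
--                     return False
--             prev = c
--             run = 1
--     r = run % 3
--     if r == 1:
--         return False
--     if r == 2: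
--         cnt += 1
--     return cnt == 1
-- ===== Notes on version B (the rewrite author's own statement) =====
-- stated objective: faster
-- what changed: B replaces A's two phases (build the list of runs as strings, then scan it with three length-class branches) by one streaming pass that keeps only a run-length counter and classifies each finished run by length%3 (which subsumes A's len==1/len==2 special cases), never materialising the runs.
-- outside the precondition, e.g. on isDecomposable(''): A raises IndexError, B raises IndexError
import Mathlib
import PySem

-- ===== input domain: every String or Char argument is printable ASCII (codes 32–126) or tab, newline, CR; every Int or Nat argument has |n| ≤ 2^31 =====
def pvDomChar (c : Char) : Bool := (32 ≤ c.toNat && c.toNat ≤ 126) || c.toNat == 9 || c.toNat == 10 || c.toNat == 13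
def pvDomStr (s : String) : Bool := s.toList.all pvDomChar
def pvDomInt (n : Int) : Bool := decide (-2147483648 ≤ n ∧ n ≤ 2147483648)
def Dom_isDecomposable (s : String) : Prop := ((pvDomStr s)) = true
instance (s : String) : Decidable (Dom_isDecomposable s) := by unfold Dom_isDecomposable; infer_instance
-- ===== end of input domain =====

-- B fuses A's run-list build and scan into one O(1)-space pass classifying runs by length % 3.


-- ===== PORT A =====
-- the first Python loop: split into runs; prev = s[i-1], t = current run (as list of chars)
def pvBuildRuns : Char → List Char → List Char → List (List Char)
  | _, t, [] => [t]
  | prev, t, c :: rest =>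
      if c = prev then pvBuildRuns c (t ++ [c]) rest
      else t :: pvBuildRuns c [c] rest

-- the second Python loop over arr, carrying cnt; early returns become results
def pvCheckRuns : List (List Char) → Int → Bool
  | [], cnt => cnt == 1
  | k :: rest, cnt =>
      if k.length == 1 then false
      else if k.length == 2 then
        (if cnt + 1 > 1 then false else pvCheckRuns rest (cnt + 1))
      else if k.length % 3 == 1 then false
      else if k.length % 3 == 2 then
        (if cnt + 1 > 1 then false else pvCheckRuns rest (cnt + 1))
      else pvCheckRuns rest cnt

def isDecomposable (s : String) : Bool :=
  match s.toList with
  | [] => false        -- Python raises IndexError on s[0]; excluded by Pre_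
  | c :: rest => pvCheckRuns (pvBuildRuns c [c] rest) 0

-- ===== PORT B =====
-- single pass: prev char, run length, pair counter
def pvScan : Char → Nat → Int → List Char → Bool
  | _, run, cnt, [] =>
      if run % 3 == 1 then false
      else if run % 3 == 2 then (cnt + 1) == 1
      else cnt == 1
  | prev, run, cnt, c :: rest =>
      if c = prev then pvScan prev (run + 1) cnt rest
      else if run % 3 == 1 then false
      else if run % 3 == 2 then
        (if cnt + 1 > 1 then false else pvScan c 1 (cnt + 1) rest)
      else pvScan c 1 cnt rest

def isDecomposable_alt (s : String) : Bool :=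
  match s.toList with
  | [] => false        -- s[0] raises in Python too; excluded by Pre_
  | c :: rest => pvScan c 1 0 rest

-- ===== PRECONDITION & SPEC =====
-- Pre_ excludes only the empty string, on which A raises IndexError at s[0].
def Pre_isDecomposable (s : String) : Prop := s ≠ ""
instance (s : String) : Decidable (Pre_isDecomposable s) := by unfold Pre_isDecomposable; infer_instance
def pvWitness_isDecomposable : String := "aabbb"

def Spec_isDecomposable (s : String) (out : Bool) : Prop := out = isDecomposable_alt s
instance (s : String) (out : Bool) : Decidable (Spec_isDecomposable s out) := by unfold Spec_isDecomposable; infer_instance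

-- ===== CLAIM (what is proved, stated in full; the proofs are below) =====
def Claim_equal_isDecomposable : Prop := ∀ (s : String), Dom_isDecomposable s → Pre_isDecomposable s → Spec_isDecomposable s (isDecomposable s)

-- ===== LEMMAS AND PROOFS =====
-- A's len==1 / len==2 special cases are subsumed by the length % 3 classification
theorem pvStep (n : Nat) (x y z : Bool) :
    (if n == 1 then x else if n == 2 then y
     else if n % 3 == 1 then x else if n % 3 == 2 then y else z)
    = (if n % 3 == 1 then x else if n % 3 == 2 then y else z) := by
  rcases n with _ | _ | _ | n
  · rfl
  · rfl
  · rfl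
  · have h1 : ((n + 3 : Nat) == 1) = false := by simp
    have h2 : ((n + 3 : Nat) == 2) = false := by simp
    rw [h1, h2]; rfl

-- the cnt > 1 early exit agrees with just testing cnt + 1 == 1
theorem pvPair (cnt : Int) :
    (if cnt + 1 > 1 then false else ((cnt + 1 == 1 : Bool))) = (cnt + 1 == 1) := by
  split_ifs with h
  · have : ¬ (cnt + 1 = 1) := by omega
    simp [this]
  · rfl

-- the bridge: A's check of the runs built from (prev, t) equals B's scan with run = t.length
theorem pvCheck_eq_scan (rest : List Char) : ∀ (prev : Char) (t : List Char) (cnt : Int),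
    pvCheckRuns (pvBuildRuns prev t rest) cnt = pvScan prev t.length cnt rest := by
  induction rest with
  | nil =>
      intro prev t cnt
      show pvCheckRuns [t] cnt = _
      rw [pvCheckRuns, pvScan]
      show (if t.length == 1 then false else _) = _
      rw [show pvCheckRuns [] (cnt + 1) = ((cnt + 1 == 1 : Bool)) from rfl,
          show pvCheckRuns [] cnt = ((cnt == 1 : Bool)) from rfl,
          pvStep, pvPair]
  | cons c rest ih =>
      intro prev t cnt
      by_cases hc : c = prev
      · subst hc
        rw [pvBuildRuns, pvScan, if_pos rfl, if_pos rfl]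
        simpa using ih c (t ++ [c]) cnt
      · rw [pvBuildRuns, pvScan, if_neg hc, if_neg hc, pvCheckRuns, pvStep, ih, ih]
        simp only [List.length_cons, List.length_nil]

-- ===== VERDICT (by name: the statement is the Claim_ definition above) =====
theorem isDecomposable_spec : Claim_equal_isDecomposable := by
  intro s _ _
  unfold Spec_isDecomposable isDecomposable isDecomposable_alt
  cases h : s.toList with
  | nil => rfl
  | cons c rest => simpa using pvCheck_eq_scan rest c [c] 0
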